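-- pv_equiv track=rewrite | github.com/hankcs/HanLP | hanlp/utils/span_util.py | bmes_to_spans
-- ===== SOURCE A (Python) =====
-- def bmes_to_spans(tags):
--     result = []
--     offset = 0
--     pre_offset = 0
--     for t in tags[1:]:
--         offset += 1
--         if t == 'B' or t == 'S':
--             result.append((pre_offset, offset))
--             pre_offset = offset
--     if offset != len(tags):
--         result.append((pre_offset, len(tags)))
--
--     return result
-- ===== SOURCE B (Python) =====
-- def bmes_to_spans(tags):
--     if not tags:
--         return []
--     starts = [0] + [i for i, t in enumerate(tags) if i > 0 and t in ('B', 'S')]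
--     return list(zip(starts, starts[1:] + [len(tags)]))
-- ===== Notes on version B (the rewrite author's own statement) =====
-- stated objective: alternative
-- what changed: B first collects the list of span-start indices (0 plus every later position tagged B or S) via enumerate+filter, then forms the spans in a second pass by zipping consecutive starts with len(tags) as the final close, instead of A's single scan that emits spans inline while tracking offset/pre_offset state.
import Mathlib
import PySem

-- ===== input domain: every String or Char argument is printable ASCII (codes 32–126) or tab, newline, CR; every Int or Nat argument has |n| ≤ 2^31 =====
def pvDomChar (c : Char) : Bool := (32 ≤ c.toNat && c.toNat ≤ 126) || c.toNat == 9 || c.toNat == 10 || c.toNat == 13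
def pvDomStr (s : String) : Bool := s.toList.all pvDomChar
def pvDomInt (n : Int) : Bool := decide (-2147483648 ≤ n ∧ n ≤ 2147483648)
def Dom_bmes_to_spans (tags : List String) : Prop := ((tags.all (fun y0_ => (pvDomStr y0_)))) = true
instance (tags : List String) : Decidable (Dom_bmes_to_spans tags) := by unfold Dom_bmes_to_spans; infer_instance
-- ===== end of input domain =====

-- B computes the start boundaries first (enumerate + filter) and then zips consecutive starts,
-- instead of emitting spans inline during the scan; objective: alternative decomposition, same O(n) cost.

-- ===== PORT A =====
-- state = (result, offset, pre_offset), folded over tags[1:] as in A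
def bmes_to_spans (tags : List String) : List (Int × Int) :=
  let s := (tags.drop 1).foldl
    (fun (st : List (Int × Int) × Int × Int) t =>
      let offset := st.2.1 + 1
      if t == "B" || t == "S" then (st.1 ++ [(st.2.2, offset)], offset, offset)
      else (st.1, offset, st.2.2))
    ([], 0, 0)
  if s.2.1 ≠ (tags.length : Int) then s.1 ++ [(s.2.2, (tags.length : Int))] else s.1

-- ===== PORT B =====
def bmes_to_spans_alt (tags : List String) : List (Int × Int) :=
  if tags = [] then []
  else
    let starts : List Int :=
      0 :: ((PySem.List.enumerate tags).filter
              (fun it => decide (0 < it.1) && (it.2 == "B" || it.2 == "S"))).map (·.1)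
    starts.zip (starts.drop 1 ++ [(tags.length : Int)])

-- ===== PRECONDITION & SPEC =====
def Spec_bmes_to_spans (tags : List String) (out : List (Int × Int)) : Prop := out = bmes_to_spans_alt tags
instance (tags : List String) (out : List (Int × Int)) : Decidable (Spec_bmes_to_spans tags out) := by unfold Spec_bmes_to_spans; infer_instance

-- ===== CLAIM (what is proved, stated in full; the proofs are below) =====
def Claim_equal_bmes_to_spans : Prop := ∀ (tags : List String), Dom_bmes_to_spans tags → Spec_bmes_to_spans tags (bmes_to_spans tags)

-- ===== LEMMAS AND PROOFS =====

-- boundary positions o+1, o+2, … of a tail list: those whose tag is B or S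
def pvBnds : List String → Nat → List Int
  | [], _ => []
  | t :: ts, o => if t == "B" || t == "S" then ((o + 1 : Nat) : Int) :: pvBnds ts (o + 1)
                  else pvBnds ts (o + 1)

theorem pvLast_cons (a : Int) (l : List Int) (p : Int) :
    (a :: l).getLast?.getD p = l.getLast?.getD a := by
  induction l generalizing a p with
  | nil => simp
  | cons b l ih =>
    rw [List.getLast?_cons_cons, ih b p]
    exact (ih b a).symm

theorem pvLoop (ts : List String) : ∀ (acc : List (Int × Int)) (o : Nat) (p : Int),
    ts.foldl
      (fun (st : List (Int × Int) × Int × Int) t =>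
        let offset := st.2.1 + 1
        if t == "B" || t == "S" then (st.1 ++ [(st.2.2, offset)], offset, offset)
        else (st.1, offset, st.2.2))
      (acc, (o : Int), p)
    = (acc ++ (p :: pvBnds ts o).zip (pvBnds ts o),
       ((o + ts.length : Nat) : Int),
       (pvBnds ts o).getLast?.getD p) := by
  induction ts with
  | nil => intro acc o p; simp [pvBnds]
  | cons t ts ih =>
    intro acc o p
    simp only [List.foldl_cons, pvBnds]
    have hcast : ((o : Int) + 1) = ((o + 1 : Nat) : Int) := by push_cast; ring
    by_cases h : (t == "B" || t == "S") = true
    · simp only [h, if_pos]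
      rw [hcast, ih]
      refine Prod.ext ?_ (Prod.ext ?_ ?_)
      · simp [List.zip_cons_cons]
      · simp; omega
      · simp [pvLast_cons]
    · rw [if_neg (by simp [h]), if_neg (by simp [h])]
      rw [hcast, ih]
      refine Prod.ext rfl (Prod.ext ?_ rfl)
      simp; omega

theorem pvZipLast (n : Int) : ∀ (bs : List Int) (p : Int),
    (p :: bs).zip (bs ++ [n]) = (p :: bs).zip bs ++ [(bs.getLast?.getD p, n)] := by
  intro bs
  induction bs with
  | nil => intro p; simp
  | cons b bs ih =>
    intro p
    rw [List.cons_append, List.zip_cons_cons, List.zip_cons_cons, ih b, pvLast_cons]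
    simp

theorem pvEnum (ts : List String) : ∀ (o : Nat),
    ((PySem.List.enumerate ts ((o : Int) + 1)).filter
        (fun it => decide (0 < it.1) && (it.2 == "B" || it.2 == "S"))).map (·.1)
    = pvBnds ts o := by
  induction ts with
  | nil => intro o; simp [PySem.List.enumerate_nil, pvBnds]
  | cons t ts ih =>
    intro o
    rw [PySem.List.enumerate_cons]
    have h1 : ((o : Int) + 1 + 1) = (((o + 1 : Nat) : Int) + 1) := by push_cast; ring
    by_cases h : (t == "B" || t == "S") = true
    · have hc : (decide ((0:Int) < (o : Int) + 1) && (t == "B" || t == "S")) = true := by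
        simp [h]
      rw [List.filter_cons, if_pos hc, List.map_cons, h1, ih (o + 1)]
      simp only [pvBnds]
      rw [if_pos h]
      rw [show ((o : Int) + 1) = ((o + 1 : Nat) : Int) by push_cast; ring]
    · have hb : (t == "B" || t == "S") = false := by
        cases hx : (t == "B" || t == "S") with
        | false => rfl
        | true => exact absurd hx h
      have hc : (decide ((0:Int) < (o : Int) + 1) && (t == "B" || t == "S")) = false := by
        rw [hb, Bool.and_false]
      rw [List.filter_cons, if_neg (by simpa using hb), h1, ih (o + 1)]
      simp only [pvBnds]
      rw [if_neg h]

theorem pvMain (tags : List String) : bmes_to_spans tags = bmes_to_spans_alt tags := by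
  cases tags with
  | nil => simp [bmes_to_spans, bmes_to_spans_alt]
  | cons t0 rest =>
    unfold bmes_to_spans bmes_to_spans_alt
    simp only [List.drop_one, List.tail_cons]
    have hl := pvLoop rest [] 0 0
    rw [Nat.cast_zero] at hl
    simp only [Nat.zero_add, List.nil_append] at hl
    rw [hl]
    have hne : ((rest.length : Int)) ≠ (((t0 :: rest).length : Int)) := by
      push_cast [List.length_cons]; omega
    rw [if_pos hne, if_neg (List.cons_ne_nil t0 rest)]
    rw [PySem.List.enumerate_cons]
    rw [List.filter_cons, if_neg (by simp)]
    have he := pvEnum rest 0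
    simp only [Nat.cast_zero, zero_add] at he
    rw [show (0:Int) + 1 = 1 by norm_num, he]
    rw [pvZipLast]

-- ===== VERDICT (by name: the statement is the Claim_ definition above) =====
theorem bmes_to_spans_spec : Claim_equal_bmes_to_spans := by
  intro tags _
  unfold Spec_bmes_to_spans
  exact pvMain tags
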